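-- pv_equiv track=rewrite | github.com/boris-kz/CogAlg | video_draft.py | lateral_comp
-- ===== SOURCE A (Python) =====
-- from collections import deque
--
-- def lateral_comp(pixel_):
--     # Comparison over x coordinate, within rng of consecutive pixels on each line
--
--     ders1_ = []  # tuples of complete 1D derivatives: summation range = rng
--     rng_ders1_ = deque(maxlen=rng)  # incomplete ders1s, within rng from input pixel: summation range < rng
--     rng_ders1_.append((0, 0, 0))
--     max_index = rng - 1  # max index of rng_ders1_
--
--     for x, p in enumerate(pixel_):  # pixel p is compared to rng of prior pixels within horizontal line, summing d and m per prior pixel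
--         back_fd, back_fm = 0, 0  # fuzzy derivatives from rng of backward comps per pri_p
--         for index, (pri_p, fd, fm) in enumerate(rng_ders1_):
--             d = p - pri_p
--             m = ave - abs(d)
--             fd += d  # bilateral fuzzy d: running sum of differences between pixel and all prior and subsequent pixels within rng
--             fm += m  # bilateral fuzzy m: running sum of matches between pixel and all prior and subsequent pixels within rng
--             back_fd += d  # running sum of d between pixel and all prior pixels within rng
--             back_fm += m  # running sum of m between pixel and all prior pixels within rng
--
--             if index < max_index:
--                 rng_ders1_[index] = (pri_p, fd, fm)
--             elif x > min_coord:  # after pri_p comp over full bilateral rng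
--                 ders1_.append((pri_p, fd, fm))  # completed bilateral tuple is transferred from rng_ders_ to ders_
--
--         rng_ders1_.appendleft((p, back_fd, back_fm))  # new tuple with initialized d and m, maxlen displaces completed tuple
--     # last incomplete rng_ders1_ in line are discarded, vs. ders1_ += reversed(rng_ders1_)
--     return ders1_
--
-- rng = 2  # Number of pixels compared to each pixel in four directions
--
-- min_coord = rng * 2 - 1  # min x and y for form_P input: ders2 from comp over rng*2 (bidirectional: before and after pixel p)
--
-- ave = 15  # |d| value that coincides with average match: mP filter
-- ===== SOURCE B (Python) =====
-- rng = 2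
-- ave = 15
--
-- def lateral_comp(pixel_):
--     # Sliding 5-pixel window (rng=2 each side): for each center b with two
--     # neighbours on both sides, sum bilateral fuzzy d and m directly.
--     out = []
--     for q0, q1, b, a, p in zip(pixel_, pixel_[1:], pixel_[2:], pixel_[3:], pixel_[4:]):
--         fd = (b - q1) + (b - q0) + (a - b) + (p - b)
--         fm = (ave - abs(b - q1)) + (ave - abs(b - q0)) + (ave - abs(a - b)) + (ave - abs(p - b))
--         out.append((b, fd, fm))
--     return out
-- ===== Notes on version B (the rewrite author's own statement) =====
-- stated objective: simpler
-- what changed: Replaced the deque of incomplete tuples with incremental in-place updates and displacement bookkeeping by a direct sliding 5-pixel window (zip of shifted lists) that computes each completed bilateral tuple in one expression.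
import Mathlib
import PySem

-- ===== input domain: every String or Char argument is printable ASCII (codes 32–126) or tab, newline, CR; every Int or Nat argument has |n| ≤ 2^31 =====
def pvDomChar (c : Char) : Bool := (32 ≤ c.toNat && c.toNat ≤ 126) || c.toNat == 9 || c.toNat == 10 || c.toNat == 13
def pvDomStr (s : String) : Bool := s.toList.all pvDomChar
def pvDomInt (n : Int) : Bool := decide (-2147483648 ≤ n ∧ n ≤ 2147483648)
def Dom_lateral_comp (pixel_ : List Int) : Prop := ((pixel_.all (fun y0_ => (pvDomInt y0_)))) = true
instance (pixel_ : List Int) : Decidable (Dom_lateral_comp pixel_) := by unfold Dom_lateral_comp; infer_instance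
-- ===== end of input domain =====

-- B replaces A's deque of incomplete tuples (updated in place, displaced by maxlen)
-- with a direct sliding 5-pixel window computing each completed tuple at once (simpler).

-- ===== PORT A =====
-- module constants
def pvRng : Nat := 2
def pvMinCoord : Nat := pvRng * 2 - 1
def pvAve : Int := 15

-- inner 'for index,(pri_p,fd,fm) in enumerate(rng_ders1_)' loop: returns
-- (updated deque, tuples appended to ders1_, back_fd, back_fm)
def pvInnerA (p : Int) (x : Nat) :
    List (Int × Int × Int) → Nat → Int → Int →
    (List (Int × Int × Int) × List (Int × Int × Int) × Int × Int)
  | [], _, bfd, bfm => ([], [], bfd, bfm)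
  | (pri_p, fd, fm) :: rest, index, bfd, bfm =>
    let d := p - pri_p
    let m := pvAve - |d|
    let fd' := fd + d
    let fm' := fm + m
    let r := pvInnerA p x rest (index + 1) (bfd + d) (bfm + m)
    if index < pvRng - 1 then
      ((pri_p, fd', fm') :: r.1, r.2.1, r.2.2.1, r.2.2.2)
    else if x > pvMinCoord then
      ((pri_p, fd, fm) :: r.1, (pri_p, fd', fm') :: r.2.1, r.2.2.1, r.2.2.2)
    else
      ((pri_p, fd, fm) :: r.1, r.2.1, r.2.2.1, r.2.2.2)

-- outer 'for x,p in enumerate(pixel_)' loop with counter x; appendleft with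
-- maxlen=rng modelled by cons followed by take rng
def pvLoopA : List Int → Nat → List (Int × Int × Int) → List (Int × Int × Int) →
    List (Int × Int × Int)
  | [], _, ders, _ => ders
  | p :: rest, x, ders, deque =>
    let r := pvInnerA p x deque 0 0 0
    pvLoopA rest (x + 1) (ders ++ r.2.1) (((p, r.2.2.1, r.2.2.2) :: r.1).take pvRng)

def lateral_comp (pixel_ : List Int) : List (Int × Int × Int) :=
  pvLoopA pixel_ 0 [] [(0, 0, 0)]

-- ===== PORT B =====
-- zip of the five shifted lists, as in Source B
def pvZip5 : List Int → List Int → List Int → List Int → List Int →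
    List (Int × Int × Int × Int × Int)
  | q0 :: t0, q1 :: t1, b :: t2, a :: t3, p :: t4 =>
    (q0, q1, b, a, p) :: pvZip5 t0 t1 t2 t3 t4
  | _, _, _, _, _ => []

def pvTuple (q0 q1 b a p : Int) : Int × Int × Int :=
  (b, (b - q1) + (b - q0) + (a - b) + (p - b),
    (pvAve - |b - q1|) + (pvAve - |b - q0|) + (pvAve - |a - b|) + (pvAve - |p - b|))

def lateral_comp_alt (pixel_ : List Int) : List (Int × Int × Int) :=
  (pvZip5 pixel_ (pixel_.drop 1) (pixel_.drop 2) (pixel_.drop 3) (pixel_.drop 4)).map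
    (fun w => pvTuple w.1 w.2.1 w.2.2.1 w.2.2.2.1 w.2.2.2.2)

-- ===== PRECONDITION & SPEC =====
def Spec_lateral_comp (pixel_ : List Int) (out : List (Int × Int × Int)) : Prop := out = lateral_comp_alt pixel_
instance (pixel_ : List Int) (out : List (Int × Int × Int)) : Decidable (Spec_lateral_comp pixel_ out) := by unfold Spec_lateral_comp; infer_instance

-- ===== CLAIM (what is proved, stated in full; the proofs are below) =====
def Claim_equal_lateral_comp : Prop := ∀ (pixel_ : List Int), Dom_lateral_comp pixel_ → Spec_lateral_comp pixel_ (lateral_comp pixel_)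

-- ===== LEMMAS AND PROOFS =====

-- sliding-window view of B's zip-of-shifts
def pvWin5 : List Int → List (Int × Int × Int)
  | q0 :: q1 :: b :: a :: p :: rest =>
    pvTuple q0 q1 b a p :: pvWin5 (q1 :: b :: a :: p :: rest)
  | _ => []

theorem pvZip5_shift (l : List Int) :
    (pvZip5 l (l.drop 1) (l.drop 2) (l.drop 3) (l.drop 4)).map
      (fun w => pvTuple w.1 w.2.1 w.2.2.1 w.2.2.2.1 w.2.2.2.2) = pvWin5 l := by
  induction hn : l.length generalizing l with
  | zero =>
    match l with
    | [] => rfl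
  | succ n ih =>
    match l with
    | q0 :: t =>
      match t with
      | [] => rfl
      | q1 :: t1 =>
        match t1 with
        | [] => rfl
        | b :: t2 =>
          match t2 with
          | [] => rfl
          | a :: t3 =>
            match t3 with
            | [] => rfl
            | p :: t4 =>
              simp only [List.drop, pvZip5, List.map, pvWin5]
              have h := ih (q1 :: b :: a :: p :: t4)
                (by simp only [List.length_cons] at hn ⊢; omega)
              simp only [List.drop] at h
              rw [h]

-- main invariant: from position x ≥ 4 on, the deque holds the last two pixels
-- a (newest) and b with exactly the partial sums A has accumulated for them,
-- and the loop emits exactly B's window tuples.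
theorem pvLoop_spec (rest : List Int) (x : Nat) (hx : 4 ≤ x)
    (q0 q1 b a : Int) (ders : List (Int × Int × Int)) :
    pvLoopA rest x ders
      [(a, (a - b) + (a - q1), (pvAve - |a - b|) + (pvAve - |a - q1|)),
       (b, (b - q1) + (b - q0) + (a - b),
        (pvAve - |b - q1|) + (pvAve - |b - q0|) + (pvAve - |a - b|))]
    = ders ++ pvWin5 (q0 :: q1 :: b :: a :: rest) := by
  induction rest generalizing x q0 q1 b a ders with
  | nil => simp [pvLoopA, pvWin5]
  | cons p rest ih =>
    have h3 : pvMinCoord < x := by simp [pvMinCoord, pvRng]; omega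
    simp only [pvLoopA, pvInnerA, pvRng, pvMinCoord] at *
    simp only [show (0 < 2 - 1) = True by decide, show (1 < 2 - 1) = False by decide,
      if_true, if_false, if_pos h3]
    have htake : ∀ (e1 e2 e3 : Int × Int × Int),
        List.take 2 [e1, e2, e3] = [e1, e2] := by intros; rfl
    rw [htake]
    simp only [zero_add]
    rw [ih (x + 1) (by omega)]
    simp [pvWin5, pvTuple]

theorem lateral_comp_spec : Claim_equal_lateral_comp := by
  intro pixel_ _
  unfold Spec_lateral_comp lateral_comp_alt
  rw [pvZip5_shift]
  match pixel_ with
  | [] => rfl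
  | [p0] => simp [lateral_comp, pvLoopA, pvInnerA, pvRng, pvWin5]
  | [p0, p1] => simp [lateral_comp, pvLoopA, pvInnerA, pvRng, pvMinCoord, pvWin5]
  | [p0, p1, p2] => simp [lateral_comp, pvLoopA, pvInnerA, pvRng, pvMinCoord, pvWin5]
  | p0 :: p1 :: p2 :: p3 :: rest =>
    simp [lateral_comp, pvLoopA, pvInnerA, pvRng]
    have h := pvLoop_spec rest 4 (by omega) p0 p1 p2 p3 []
    simpa using h
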